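-- pv_equiv track=rewrite | github.com/groom2hub/Programmers | Level_0/split_str.py | solution
-- ===== SOURCE A (Python) =====
-- def solution(myStr):
--     splitStr = ['a', 'b', 'c']
--     for i in splitStr:
--         myStr = myStr.replace(i, ' ')
--
--     answer = [i for i in myStr.split()]
--     if len(answer) == 0:
--         answer.append("EMPTY")
--
--     return answer
-- ===== SOURCE B (Python) =====
-- def solution(myStr):
--     res = []
--     cur = ""
--     for ch in myStr:
--         if ch == 'a' or ch == 'b' or ch == 'c' or ch.isspace():
--             if cur:
--                 res.append(cur)
--                 cur = ""
--         else:
--             cur += ch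
--     if cur:
--         res.append(cur)
--     if not res:
--         res.append("EMPTY")
--     return res
-- ===== Notes on version B (the rewrite author's own statement) =====
-- stated objective: alternative
-- what changed: Replaces the three full replace() passes plus a split() pass with a single-pass tokenizer that flushes the current token whenever it sees 'a','b','c' or a whitespace character.
import Mathlib
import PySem

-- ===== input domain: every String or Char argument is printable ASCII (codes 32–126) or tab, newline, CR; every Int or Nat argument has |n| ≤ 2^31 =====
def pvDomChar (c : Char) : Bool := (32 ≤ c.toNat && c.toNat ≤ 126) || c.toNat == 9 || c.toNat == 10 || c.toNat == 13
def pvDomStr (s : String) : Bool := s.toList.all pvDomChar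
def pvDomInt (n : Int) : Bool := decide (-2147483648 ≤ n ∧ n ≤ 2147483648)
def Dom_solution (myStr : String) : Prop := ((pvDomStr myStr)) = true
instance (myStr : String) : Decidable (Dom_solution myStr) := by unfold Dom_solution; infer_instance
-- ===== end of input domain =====

-- B replaces A's three replace() passes + split() with one single-pass tokenizer (alternative decomposition, same asymptotic cost).

-- ===== PORT A =====
-- for i in ['a','b','c']: myStr = myStr.replace(i, ' '); answer = myStr.split(); append "EMPTY" if empty
def solution (myStr : String) : List String :=
  let s := ["a", "b", "c"].foldl (fun acc i => PySem.Str.replace acc i " ") myStr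
  let answer := PySem.Str.split₀ s
  if answer.length = 0 then answer ++ ["EMPTY"] else answer

-- ===== PORT B =====
-- single-pass tokenizer over the characters; tokens are char lists, turned into strings at the end
def solTok : List Char → List Char → List (List Char)
  | [], cur => if cur = [] then [] else [cur]
  | c :: rest, cur =>
      if c = 'a' ∨ c = 'b' ∨ c = 'c' ∨ PySem.Chars.isspace c then
        (if cur = [] then solTok rest [] else cur :: solTok rest [])
      else solTok rest (cur ++ [c])

def solution_alt (myStr : String) : List String :=
  let res := (solTok myStr.toList []).map String.ofList
  if res = [] then ["EMPTY"] else res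

-- ===== PRECONDITION & SPEC =====
def Spec_solution (myStr : String) (out : List String) : Prop := out = solution_alt myStr
instance (myStr : String) (out : List String) : Decidable (Spec_solution myStr out) := by unfold Spec_solution; infer_instance

-- ===== CLAIM (what is proved, stated in full; the proofs are below) =====
def Claim_equal_solution : Prop := ∀ (myStr : String), Dom_solution myStr → Spec_solution myStr (solution myStr)

-- ===== LEMMAS AND PROOFS =====

-- single-char replace is a pointwise map
theorem replace_go_single (a b : Char) :
    ∀ (fuel : Nat) (l acc : List Char), l.length ≤ fuel →
      PySem.Chars.replace.go [a] [b] fuel l acc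
        = acc.reverse ++ l.map (fun c => if c = a then b else c) := by
  intro fuel
  induction fuel with
  | zero =>
    intro l acc h
    have : l = [] := List.eq_nil_of_length_eq_zero (Nat.le_zero.mp h)
    subst this
    simp [PySem.Chars.replace.go]
  | succ n ih =>
    intro l acc h
    cases l with
    | nil => simp [PySem.Chars.replace.go]
    | cons c t =>
      simp only [PySem.Chars.replace.go, List.isPrefixOf, List.map]
      by_cases hc : c = a
      · subst hc
        simp only [BEq.rfl, Bool.true_and, if_pos, List.length_cons, List.length_nil,
          List.drop_succ_cons, List.drop_zero, List.reverse_cons, List.reverse_nil,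
          List.nil_append, List.singleton_append]
        rw [ih t (b :: acc) (by simpa using Nat.le_of_succ_le_succ h)]
        simp
      · have hbe : (a == c) = false := by simp [beq_iff_eq]; exact fun he => hc he.symm
        simp only [hbe, Bool.false_and, if_neg, Bool.false_eq_true, not_false_iff]
        rw [ih t (c :: acc) (by simpa using Nat.le_of_succ_le_succ h)]
        simp [hc]

theorem replace_single (a b : Char) (l : List Char) :
    PySem.Chars.replace l [a] [b] = l.map (fun c => if c = a then b else c) := by
  simp only [PySem.Chars.replace, List.isEmpty, List.isEmpty_cons]
  exact (replace_go_single a b l.length l [] le_rfl)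

-- the composed substitution A performs
def subABC (c : Char) : Char :=
  if (if (if c = 'a' then ' ' else c) = 'b' then ' ' else (if c = 'a' then ' ' else c)) = 'c'
  then ' '
  else (if (if c = 'a' then ' ' else c) = 'b' then ' ' else (if c = 'a' then ' ' else c))

theorem isspace_subABC (c : Char) :
    PySem.Chars.isspace (subABC c)
      = decide (c = 'a' ∨ c = 'b' ∨ c = 'c' ∨ PySem.Chars.isspace c) := by
  by_cases ha : c = 'a'
  · subst ha; decide
  · by_cases hb : c = 'b'
    · subst hb; decide
    · by_cases hc : c = 'c'
      · subst hc; decide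
      · simp [subABC, ha, hb, hc]

theorem subABC_of_not_sep (c : Char)
    (h : ¬ (c = 'a' ∨ c = 'b' ∨ c = 'c' ∨ PySem.Chars.isspace c)) : subABC c = c := by
  rw [not_or, not_or, not_or] at h
  simp [subABC, h.1, h.2.1, h.2.2.1]

theorem split_go_tok :
    ∀ (cs cur acc : List Char) (accs : List (List Char)),
      PySem.Chars.split₀.go (cs.map subABC) cur accs
        = accs.reverse ++ solTok cs cur.reverse := by
  intro cs
  induction cs with
  | nil =>
    intro cur acc accs
    by_cases h : cur = []
    · subst h; simp [PySem.Chars.split₀.go, solTok]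
    · simp [PySem.Chars.split₀.go, solTok, h, List.isEmpty_iff]
  | cons c rest ih =>
    intro cur acc accs
    by_cases hsep : c = 'a' ∨ c = 'b' ∨ c = 'c' ∨ PySem.Chars.isspace c
    · have hsp : PySem.Chars.isspace (subABC c) = true := by
        rw [isspace_subABC]; exact decide_eq_true hsep
      by_cases hcur : cur = []
      · subst hcur
        simp only [List.map, PySem.Chars.split₀.go, hsp, if_pos, List.isEmpty_nil, if_true]
        rw [ih [] acc accs]
        simp [solTok, hsep]
      · have hne : cur.isEmpty = false := by simp [List.isEmpty_iff, hcur]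
        simp only [List.map, PySem.Chars.split₀.go, hsp, if_pos, hne, Bool.false_eq_true,
          if_false, if_true]
        rw [ih [] acc (cur.reverse :: accs)]
        have hrne : cur.reverse ≠ [] := by simpa using hcur
        simp [solTok, hsep, hrne]
    · have hsp : PySem.Chars.isspace (subABC c) = false := by
        rw [isspace_subABC]; exact decide_eq_false hsep
      simp only [List.map, PySem.Chars.split₀.go, hsp, Bool.false_eq_true, if_false]
      rw [subABC_of_not_sep c hsep, ih (c :: cur) acc accs]
      simp [solTok, hsep]

theorem chars_core (cs : List Char) :
    PySem.Chars.split₀ (cs.map subABC) = solTok cs [] := by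
  simpa using split_go_tok cs [] [] []

theorem replaced_eq_map (s : String) :
    (["a", "b", "c"].foldl (fun acc i => PySem.Str.replace acc i " ") s).toList
      = s.toList.map subABC := by
  simp only [List.foldl, PySem.Str.toList_replace]
  rw [show "a".toList = ['a'] from rfl, show "b".toList = ['b'] from rfl,
    show "c".toList = ['c'] from rfl, show " ".toList = [' '] from rfl]
  rw [replace_single 'a' ' ', replace_single 'b' ' ', replace_single 'c' ' ',
    List.map_map, List.map_map]
  rfl

-- ===== VERDICT (by name: the statement is the Claim_ definition above) =====
theorem solution_spec : Claim_equal_solution := by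
  intro myStr _
  unfold Spec_solution solution solution_alt
  have h : PySem.Str.split₀ (["a", "b", "c"].foldl (fun acc i => PySem.Str.replace acc i " ") myStr)
      = (solTok myStr.toList []).map String.ofList := by
    unfold PySem.Str.split₀
    rw [replaced_eq_map, chars_core]
  simp only [h]
  by_cases he : (solTok myStr.toList []).map String.ofList = []
  · simp [he]
  · simp only [List.length_eq_zero_iff, he]
    simp [he]
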